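-- pv_equiv track=rewrite | github.com/farida-bano/AI-Employee-0 | dashboard_manager.py | example_dashboard_update
-- ===== SOURCE A (Python) =====
-- def example_dashboard_update(content):
--     """Example update function that adds a new entry"""
--     lines = content.split('\n')
--     updated_lines = []
--     added = False
--
--     for line in lines:
--         if line.strip() == "## Tasks in Progress" and not added:
--             updated_lines.append(line)
--             updated_lines.append("- Example task added by dashboard manager")
--             added = True
--         else:
--             updated_lines.append(line)
--
--     return '\n'.join(updated_lines)
-- ===== SOURCE B (Python) =====
-- def example_dashboard_update(content):
--     """Example update function that adds a new entry"""
--     lines = content.split('\n')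
--     idx = next((i for i, l in enumerate(lines) if l.strip() == "## Tasks in Progress"), None)
--     if idx is not None:
--         lines[idx + 1:idx + 1] = ["- Example task added by dashboard manager"]
--     return '\n'.join(lines)
-- ===== Notes on version B (the rewrite author's own statement) =====
-- stated objective: simpler
-- what changed: Replaces the accumulate-with-added-flag loop by a find-first-index scan followed by a single slice insertion (splice), preserving first-match-only semantics.
import Mathlib
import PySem

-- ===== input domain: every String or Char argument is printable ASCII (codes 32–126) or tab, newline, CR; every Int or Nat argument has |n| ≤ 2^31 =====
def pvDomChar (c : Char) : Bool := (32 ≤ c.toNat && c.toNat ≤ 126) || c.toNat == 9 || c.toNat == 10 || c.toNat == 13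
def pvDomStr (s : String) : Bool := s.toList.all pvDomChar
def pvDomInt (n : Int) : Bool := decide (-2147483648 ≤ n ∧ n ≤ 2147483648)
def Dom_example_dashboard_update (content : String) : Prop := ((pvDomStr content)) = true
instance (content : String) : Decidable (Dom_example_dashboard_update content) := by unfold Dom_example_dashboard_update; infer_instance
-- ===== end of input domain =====

-- B replaces A's accumulate-with-added-flag loop by find-first-index + one splice; objective: simpler.

-- ===== PORT A =====
def example_dashboard_update (content : String) : String :=
  let lines := (PySem.Str.split? content "\n").getD []
  let st := lines.foldl
    (fun (st : List String × Bool) line =>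
      if PySem.Str.strip line == "## Tasks in Progress" && !st.2 then
        ((st.1 ++ [line]) ++ ["- Example task added by dashboard manager"], true)
      else
        (st.1 ++ [line], st.2))
    (([] : List String), false)
  PySem.Str.join "\n" st.1

-- ===== PORT B =====
def example_dashboard_update_alt (content : String) : String :=
  let lines := (PySem.Str.split? content "\n").getD []
  let out :=
    match lines.findIdx? (fun l => PySem.Str.strip l == "## Tasks in Progress") with
    | some i => lines.take (i + 1) ++ ["- Example task added by dashboard manager"] ++ lines.drop (i + 1)
    | none => lines
  PySem.Str.join "\n" out

-- ===== PRECONDITION & SPEC =====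
def Spec_example_dashboard_update (content : String) (out : String) : Prop := out = example_dashboard_update_alt content
instance (content : String) (out : String) : Decidable (Spec_example_dashboard_update content out) := by unfold Spec_example_dashboard_update; infer_instance

-- ===== CLAIM (what is proved, stated in full; the proofs are below) =====
def Claim_equal_example_dashboard_update : Prop := ∀ (content : String), Dom_example_dashboard_update content → Spec_example_dashboard_update content (example_dashboard_update content)

-- ===== LEMMAS AND PROOFS =====

-- Once the line has been inserted, A's loop just appends the remaining lines.
lemma fold_added_true (ls acc : List String) :
    (ls.foldl
      (fun (st : List String × Bool) line =>
        if PySem.Str.strip line == "## Tasks in Progress" && !st.2 then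
          ((st.1 ++ [line]) ++ ["- Example task added by dashboard manager"], true)
        else
          (st.1 ++ [line], st.2))
      (acc, true)) = (acc ++ ls, true) := by
  induction ls generalizing acc with
  | nil => simp
  | cons x xs ih =>
    rw [List.foldl_cons, if_neg (by simp), ih]
    simp

-- A's loop from added = false computes exactly B's find-then-splice result (prefixed by acc).
lemma fold_spec (ls acc : List String) :
    (ls.foldl
      (fun (st : List String × Bool) line =>
        if PySem.Str.strip line == "## Tasks in Progress" && !st.2 then
          ((st.1 ++ [line]) ++ ["- Example task added by dashboard manager"], true)
        else
          (st.1 ++ [line], st.2))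
      (acc, false)).1 =
    acc ++
      (match ls.findIdx? (fun l => PySem.Str.strip l == "## Tasks in Progress") with
       | some i => ls.take (i + 1) ++ ["- Example task added by dashboard manager"] ++ ls.drop (i + 1)
       | none => ls) := by
  induction ls generalizing acc with
  | nil => simp
  | cons x xs ih =>
    by_cases hx : PySem.Str.strip x == "## Tasks in Progress"
    · rw [List.foldl_cons, if_pos (by simp [hx]), fold_added_true]
      simp [List.findIdx?_cons, hx]
    · rw [List.foldl_cons, if_neg (by simp [hx]), ih]
      simp only [List.findIdx?_cons, hx]
      cases h : xs.findIdx? (fun l => PySem.Str.strip l == "## Tasks in Progress") with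
      | none => simp
      | some i => simp [List.take_succ_cons, List.drop_succ_cons]

-- ===== VERDICT (by name: the statement is the Claim_ definition above) =====
theorem example_dashboard_update_spec : Claim_equal_example_dashboard_update := by
  intro content _
  unfold Spec_example_dashboard_update example_dashboard_update example_dashboard_update_alt
  simp only []
  rw [fold_spec]
  simp
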